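-- pv_equiv track=rewrite | github.com/ScottRMalley/advent-of-code-2020 | solutions/day_16/__init__.py | remove_totally_invalid
-- ===== SOURCE A (Python) =====
-- def check_totally_invalid(rules, ticket_value):
--     for rule in rules:
--         if rule[0][0] <= ticket_value <= rule[0][1] or rule[1][0] <= ticket_value <= rule[1][1]:
--             return False
--     return True
--
-- def remove_totally_invalid(rules, tickets):
--     valid_tickets = []
--     for ticket in tickets:
--         valid_ticket = True
--         for val in ticket:
--             if check_totally_invalid(rules, val):
--                 valid_ticket = False
--         if valid_ticket:
--             valid_tickets.append(ticket)
--     return valid_tickets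
-- ===== SOURCE B (Python) =====
-- def remove_totally_invalid(rules, tickets):
--     # Disjoint interval table: flatten the two-bound ranges among each rule's
--     # first two, sort by lo, merge overlapping/adjacent inclusive intervals.
--     pairs = sorted(((rg[0], rg[1]) for rule in rules for rg in rule[0:2] if len(rg) >= 2),
--                    key=lambda p: p[0])
--     merged = []
--     cur = None
--     for p in pairs:
--         if cur is None:
--             cur = p
--         elif p[0] <= cur[1] + 1:
--             cur = (cur[0], max(cur[1], p[1]))
--         else:
--             merged.append(cur)
--             cur = p
--     if cur is not None:
--         merged.append(cur)
--
--     def covered(v):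
--         for lo, hi in merged:
--             if v < lo:
--                 return False
--             if v <= hi:
--                 return True
--         return False
--
--     return [t for t in tickets if all(covered(v) for v in t)]
-- ===== Notes on version B (the rewrite author's own statement) =====
-- stated objective: faster
-- what changed: B flattens all two-bound rule ranges once, sorts them and merges them into a disjoint sorted interval table, then keeps a ticket iff every value is found by an early-exit scan of that table, instead of A's per-value rescan of every rule's two ranges with a boolean flag; per value the scan shrinks from all 2R ranges to the merged disjoint intervals.
import Mathlib
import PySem

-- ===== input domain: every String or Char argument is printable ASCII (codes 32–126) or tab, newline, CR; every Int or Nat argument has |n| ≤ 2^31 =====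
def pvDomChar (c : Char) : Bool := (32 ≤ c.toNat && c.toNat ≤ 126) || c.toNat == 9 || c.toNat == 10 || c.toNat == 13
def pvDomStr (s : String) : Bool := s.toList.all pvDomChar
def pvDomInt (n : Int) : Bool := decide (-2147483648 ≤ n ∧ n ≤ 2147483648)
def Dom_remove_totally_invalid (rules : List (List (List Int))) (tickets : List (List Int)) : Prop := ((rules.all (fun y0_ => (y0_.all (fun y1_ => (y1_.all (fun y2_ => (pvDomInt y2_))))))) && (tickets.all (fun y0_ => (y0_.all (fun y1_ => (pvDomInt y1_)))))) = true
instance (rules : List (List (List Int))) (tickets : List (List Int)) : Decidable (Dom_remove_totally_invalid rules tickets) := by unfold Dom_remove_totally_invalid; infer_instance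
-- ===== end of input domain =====

-- B replaces A's per-value rescan of every rule's two ranges by a sorted, merged
-- disjoint interval table queried by an early-exit scan (objective: faster, as measured
-- in a timing run).

-- ===== PORT A =====
def pvCheckTI (rules : List (List (List Int))) (v : Int) : Bool :=
  match rules with
  | [] => true
  | rule :: rest =>
    if ((PySem.List.pyGet? ((PySem.List.pyGet? rule 0).getD []) 0).getD 0 ≤ v ∧
        v ≤ (PySem.List.pyGet? ((PySem.List.pyGet? rule 0).getD []) 1).getD 0)
       ∨ ((PySem.List.pyGet? ((PySem.List.pyGet? rule 1).getD []) 0).getD 0 ≤ v ∧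
        v ≤ (PySem.List.pyGet? ((PySem.List.pyGet? rule 1).getD []) 1).getD 0)
    then false else pvCheckTI rest v

def remove_totally_invalid (rules : List (List (List Int))) (tickets : List (List Int)) : List (List Int) :=
  tickets.foldl (fun acc ticket =>
    let valid := ticket.foldl (fun b v => if pvCheckTI rules v then false else b) true
    if valid then acc ++ [ticket] else acc) []

-- ===== PORT B =====
def pvPairs (rules : List (List (List Int))) : List (Int × Int) :=
  PySem.List.sorted
    (rules.flatMap (fun rule =>
      ((PySem.List.slice rule (some 0) (some 2)).filter (fun rg => decide (2 ≤ rg.length))).map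
        (fun rg => ((PySem.List.pyGet? rg 0).getD 0, (PySem.List.pyGet? rg 1).getD 0))))
    (fun p => p.1) false

def pvMergeStep (st : List (Int × Int) × Option (Int × Int)) (p : Int × Int) : List (Int × Int) × Option (Int × Int) :=
  match st.2 with
  | none => (st.1, some p)
  | some c => if p.1 ≤ c.2 + 1 then (st.1, some (c.1, max c.2 p.2)) else (st.1 ++ [c], some p)

def pvMerge (pairs : List (Int × Int)) : List (Int × Int) :=
  let st := pairs.foldl pvMergeStep ([], none)
  match st.2 with
  | none => st.1
  | some c => st.1 ++ [c]

def pvCovered (table : List (Int × Int)) (v : Int) : Bool :=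
  match table with
  | [] => false
  | (lo, hi) :: rest => if v < lo then false else if v ≤ hi then true else pvCovered rest v

def remove_totally_invalid_alt (rules : List (List (List Int))) (tickets : List (List Int)) : List (List Int) :=
  let merged := pvMerge (pvPairs rules)
  tickets.filter (fun t => t.all (fun v => pvCovered merged v))

-- ===== PRECONDITION & SPEC =====
def pvRangeMatch (rule : List (List Int)) (v : Int) : Bool :=
  (decide ((rule.getD 0 []).getD 0 0 ≤ v) && decide (v ≤ (rule.getD 0 []).getD 1 0)) ||
  (decide ((rule.getD 1 []).getD 0 0 ≤ v) && decide (v ≤ (rule.getD 1 []).getD 1 0))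

-- a range is scanned safely for value v: it has both bounds, or its only bound already fails 'lo <= v'
def pvRgSafe (rg : List Int) (v : Int) : Bool :=
  decide (2 ≤ rg.length) || (decide (rg.length = 1) && decide (v < rg.getD 0 0))

-- A's scan of one rule reaches a verdict for v (match or pass) without an IndexError
def pvRuleSafe (rule : List (List Int)) (v : Int) : Bool :=
  decide (1 ≤ rule.length) &&
    ((decide (2 ≤ (rule.getD 0 []).length) && decide ((rule.getD 0 []).getD 0 0 ≤ v) &&
        decide (v ≤ (rule.getD 0 []).getD 1 0)) ||
     (pvRgSafe (rule.getD 0 []) v && decide (2 ≤ rule.length) && pvRgSafe (rule.getD 1 []) v))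

-- Pre_ excludes exactly the inputs on which Python A raises IndexError: some checked
-- ticket value neither matches within the prefix of rules it can scan safely nor
-- passes safely through all rules.
def Pre_remove_totally_invalid (rules : List (List (List Int))) (tickets : List (List Int)) : Prop :=
  ∀ t ∈ tickets, ∀ v ∈ t,
    (∀ rule ∈ rules, pvRuleSafe rule v = true) ∨
    (∃ rule ∈ rules.takeWhile (fun r => pvRuleSafe r v), pvRangeMatch rule v = true)
instance (rules : List (List (List Int))) (tickets : List (List Int)) : Decidable (Pre_remove_totally_invalid rules tickets) := by unfold Pre_remove_totally_invalid; infer_instance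

def pvWitness_remove_totally_invalid : List (List (List Int)) × List (List Int) :=
  ([[[0, 1], [3, 4]]], [[0], [2]])

def Spec_remove_totally_invalid (rules : List (List (List Int))) (tickets : List (List Int)) (out : List (List Int)) : Prop := out = remove_totally_invalid_alt rules tickets
instance (rules : List (List (List Int))) (tickets : List (List Int)) (out : List (List Int)) : Decidable (Spec_remove_totally_invalid rules tickets out) := by unfold Spec_remove_totally_invalid; infer_instance

-- ===== CLAIM (what is proved, stated in full; the proofs are below) =====
def Claim_equal_remove_totally_invalid : Prop := ∀ (rules : List (List (List Int))) (tickets : List (List Int)), Dom_remove_totally_invalid rules tickets → Pre_remove_totally_invalid rules tickets → Spec_remove_totally_invalid rules tickets (remove_totally_invalid rules tickets)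

-- ===== LEMMAS AND PROOFS =====

def pvPairAt (rule : List (List Int)) (i : Int) : Int × Int :=
  ((PySem.List.pyGet? ((PySem.List.pyGet? rule i).getD []) 0).getD 0,
   (PySem.List.pyGet? ((PySem.List.pyGet? rule i).getD []) 1).getD 0)

-- the flattening contribution of one rule in B
def pvPairsOf (rule : List (List Int)) : List (Int × Int) :=
  ((PySem.List.slice rule (some 0) (some 2)).filter (fun rg => decide (2 ≤ rg.length))).map
    (fun rg => ((PySem.List.pyGet? rg 0).getD 0, (PySem.List.pyGet? rg 1).getD 0))

def pvCovers (L : List (Int × Int)) (v : Int) : Prop := ∃ p ∈ L, p.1 ≤ v ∧ v ≤ p.2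

lemma pvCovers_cons (p : Int × Int) (L : List (Int × Int)) (v : Int) :
    pvCovers (p :: L) v ↔ (p.1 ≤ v ∧ v ≤ p.2) ∨ pvCovers L v := by
  simp [pvCovers]

lemma pyGetD0 {α : Type} (xs : List α) (d : α) : (PySem.List.pyGet? xs 0).getD d = xs.getD 0 d := by
  cases xs <;> simp [PySem.List.pyGet?, PySem.List.pyIdx?, List.getD]

lemma pyGetD1 {α : Type} (xs : List α) (d : α) : (PySem.List.pyGet? xs 1).getD d = xs.getD 1 d := by
  cases xs with
  | nil => simp [PySem.List.pyGet?, PySem.List.pyIdx?, List.getD]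
  | cons x xt => cases xt <;> simp [PySem.List.pyGet?, PySem.List.pyIdx?, List.getD]

lemma pairAt0 (rule : List (List Int)) :
    pvPairAt rule 0 = ((rule.getD 0 []).getD 0 0, (rule.getD 0 []).getD 1 0) := by
  simp only [pvPairAt, pyGetD0, pyGetD1]

lemma pairAt1 (rule : List (List Int)) :
    pvPairAt rule 1 = ((rule.getD 1 []).getD 0 0, (rule.getD 1 []).getD 1 0) := by
  simp only [pvPairAt, pyGetD0, pyGetD1]

lemma slice02 {α : Type} (l : List α) : PySem.List.slice l (some 0) (some 2) = l.take 2 := by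
  simp [pysem]

lemma pairsOf_eq (rule : List (List Int)) :
    pvPairsOf rule = ((rule.take 2).filter (fun rg => decide (2 ≤ rg.length))).map
      (fun rg => (rg.getD 0 0, rg.getD 1 0)) := by
  unfold pvPairsOf
  rw [slice02]
  simp only [pyGetD0, pyGetD1]

lemma guard_cover_to_match (rule : List (List Int)) (v : Int)
    (h : ∃ p ∈ pvPairsOf rule, p.1 ≤ v ∧ v ≤ p.2) : pvRangeMatch rule v = true := by
  rw [pairsOf_eq] at h
  obtain ⟨p, hp, ha⟩ := h
  rw [List.mem_map] at hp
  obtain ⟨rg, hrg, rfl⟩ := hp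
  rw [List.mem_filter, decide_eq_true_eq] at hrg
  obtain ⟨hmem, hlen⟩ := hrg
  rcases rule with _ | ⟨r0, _ | ⟨r1, rest⟩⟩
  · simp at hmem
  · simp only [List.take, List.mem_singleton] at hmem
    subst hmem
    simp only [pvRangeMatch, List.getD, List.getElem?_cons_zero, Option.getD_some,
      Bool.or_eq_true, Bool.and_eq_true, decide_eq_true_eq]
    left; exact ⟨ha.1, ha.2⟩
  · simp only [List.take, List.mem_cons, List.not_mem_nil, or_false] at hmem
    rcases hmem with rfl | rfl
    · simp only [pvRangeMatch, List.getD, List.getElem?_cons_zero, List.getElem?_cons_succ,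
        Option.getD_some, Bool.or_eq_true, Bool.and_eq_true, decide_eq_true_eq]
      left; exact ⟨ha.1, ha.2⟩
    · simp only [pvRangeMatch, List.getD, List.getElem?_cons_zero, List.getElem?_cons_succ,
        Option.getD_some, Bool.or_eq_true, Bool.and_eq_true, decide_eq_true_eq]
      right; exact ⟨ha.1, ha.2⟩

lemma match_safe_to_cover (rule : List (List Int)) (v : Int)
    (hs : pvRuleSafe rule v = true) (hm : pvRangeMatch rule v = true) :
    ∃ p ∈ pvPairsOf rule, p.1 ≤ v ∧ v ≤ p.2 := by
  rw [pairsOf_eq]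
  simp only [List.getD_eq_getElem?_getD]
  simp only [pvRuleSafe, pvRgSafe, pvRangeMatch, Bool.and_eq_true, Bool.or_eq_true,
    decide_eq_true_eq, List.getD_eq_getElem?_getD] at hs hm
  rcases rule with _ | ⟨r0, _ | ⟨r1, rest⟩⟩
  · simp at hs
  · simp only [List.getElem?_cons_zero, List.getElem?_cons_succ, List.getElem?_nil,
      Option.getD_some, Option.getD_none, List.length_cons, List.length_nil] at hs hm
    rcases hs.2 with ⟨⟨h0, hlo⟩, hhi⟩ | ⟨⟨_, hbad⟩, _⟩
    · refine ⟨(r0[0]?.getD 0, r0[1]?.getD 0), ?_, hlo, hhi⟩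
      rw [List.mem_map]
      exact ⟨r0, by rw [List.mem_filter]; exact ⟨by simp [List.take], by simp [h0]⟩, by
        simp [List.getD_eq_getElem?_getD]⟩
    · omega  -- second safety branch is impossible for a one-element rule
  · simp only [List.getElem?_cons_zero, List.getElem?_cons_succ,
      Option.getD_some, List.length_cons] at hs hm
    have mem0 : ∀ h0 : 2 ≤ r0.length, (r0[0]?.getD 0, r0[1]?.getD 0) ∈
        (((r0 :: r1 :: rest).take 2).filter (fun rg => decide (2 ≤ rg.length))).map
          (fun rg => (rg.getD 0 0, rg.getD 1 0)) := by
      intro h0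
      rw [List.mem_map]
      exact ⟨r0, by rw [List.mem_filter]; exact ⟨by simp [List.take], by simp [h0]⟩, by
        simp [List.getD_eq_getElem?_getD]⟩
    have mem1 : ∀ h1 : 2 ≤ r1.length, (r1[0]?.getD 0, r1[1]?.getD 0) ∈
        (((r0 :: r1 :: rest).take 2).filter (fun rg => decide (2 ≤ rg.length))).map
          (fun rg => (rg.getD 0 0, rg.getD 1 0)) := by
      intro h1
      rw [List.mem_map]
      exact ⟨r1, by rw [List.mem_filter]; exact ⟨by simp [List.take], by simp [h1]⟩, by
        simp [List.getD_eq_getElem?_getD]⟩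
    rcases hs.2 with ⟨⟨h0, hlo⟩, hhi⟩ | ⟨⟨hr0s, -⟩, hr1s⟩
    · exact ⟨_, mem0 h0, hlo, hhi⟩
    · rcases hm with ⟨hlo0, hhi0⟩ | ⟨hlo1, hhi1⟩
      · have h0 : 2 ≤ r0.length := by
          rcases hr0s with h | ⟨_, hlt⟩
          · exact h
          · omega
        exact ⟨_, mem0 h0, hlo0, hhi0⟩
      · have h1 : 2 ≤ r1.length := by
          rcases hr1s with h | ⟨_, hlt⟩
          · exact h
          · omega
        exact ⟨_, mem1 h1, hlo1, hhi1⟩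

-- proof-side recursive presentation of the merge loop
def pvMergeRec : Option (Int × Int) → List (Int × Int) → List (Int × Int)
  | none, [] => []
  | some c, [] => [c]
  | none, p :: rest => pvMergeRec (some p) rest
  | some c, p :: rest =>
    if p.1 ≤ c.2 + 1 then pvMergeRec (some (c.1, max c.2 p.2)) rest
    else c :: pvMergeRec (some p) rest

lemma mergeRec_eq (pairs : List (Int × Int)) : ∀ (out : List (Int × Int)) (cur : Option (Int × Int)),
    (match (pairs.foldl pvMergeStep (out, cur)).2 with
     | none => (pairs.foldl pvMergeStep (out, cur)).1
     | some c => (pairs.foldl pvMergeStep (out, cur)).1 ++ [c]) = out ++ pvMergeRec cur pairs := by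
  induction pairs with
  | nil => intro out cur; cases cur <;> simp [pvMergeRec]
  | cons p rest ih =>
    intro out cur
    cases cur with
    | none => simpa [pvMergeStep, pvMergeRec] using ih out (some p)
    | some c =>
      by_cases h : p.1 ≤ c.2 + 1
      · simpa [pvMergeStep, pvMergeRec, h] using ih out (some (c.1, max c.2 p.2))
      · have := ih (out ++ [c]) (some p)
        simpa [pvMergeStep, pvMergeRec, h] using this

lemma pvMerge_eq (pairs : List (Int × Int)) : pvMerge pairs = pvMergeRec none pairs := by
  simpa [pvMerge] using mergeRec_eq pairs [] none

lemma mergeRec_covers (v : Int) : ∀ (pairs : List (Int × Int)) (c : Int × Int),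
    pairs.Pairwise (fun p q => p.1 ≤ q.1) → (∀ p ∈ pairs, c.1 ≤ p.1) →
    (pvCovers (pvMergeRec (some c) pairs) v ↔ (c.1 ≤ v ∧ v ≤ c.2) ∨ pvCovers pairs v) := by
  intro pairs
  induction pairs with
  | nil => intro c _ _; simp [pvMergeRec, pvCovers]
  | cons p rest ih =>
    intro c hpw hc
    rw [List.pairwise_cons] at hpw
    obtain ⟨hp, hpw'⟩ := hpw
    have hcp : c.1 ≤ p.1 := hc p List.mem_cons_self
    by_cases h : p.1 ≤ c.2 + 1
    · rw [show pvMergeRec (some c) (p :: rest) = pvMergeRec (some (c.1, max c.2 p.2)) rest from by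
        simp [pvMergeRec, h]]
      rw [ih (c.1, max c.2 p.2) hpw' (fun q hq => hc q (List.mem_cons_of_mem _ hq))]
      rw [pvCovers_cons]
      have hmax := max_choice c.2 p.2
      by_cases hX : pvCovers rest v
      · simp [hX]
      · simp only [hX, or_false]
        rcases hmax with hm | hm <;> rw [hm] <;> constructor <;> intro hh <;> omega
    · rw [show pvMergeRec (some c) (p :: rest) = c :: pvMergeRec (some p) rest from by
        simp [pvMergeRec, h]]
      rw [pvCovers_cons, ih p hpw' hp, pvCovers_cons]

lemma merge_covers (v : Int) (pairs : List (Int × Int)) (h : pairs.Pairwise (fun p q => p.1 ≤ q.1)) :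
    pvCovers (pvMerge pairs) v ↔ pvCovers pairs v := by
  rw [pvMerge_eq]
  cases pairs with
  | nil => simp [pvMergeRec]
  | cons p rest =>
    rw [List.pairwise_cons] at h
    rw [show pvMergeRec none (p :: rest) = pvMergeRec (some p) rest from rfl]
    rw [mergeRec_covers v rest p h.2 h.1, pvCovers_cons]

lemma mergeRec_pairwise : ∀ (pairs : List (Int × Int)) (c : Int × Int),
    pairs.Pairwise (fun p q => p.1 ≤ q.1) → (∀ p ∈ pairs, c.1 ≤ p.1) →
    (pvMergeRec (some c) pairs).Pairwise (fun p q => p.1 ≤ q.1) ∧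
      ∀ q ∈ pvMergeRec (some c) pairs, c.1 ≤ q.1 := by
  intro pairs
  induction pairs with
  | nil => intro c _ _; simp [pvMergeRec]
  | cons p rest ih =>
    intro c hpw hc
    rw [List.pairwise_cons] at hpw
    obtain ⟨hp, hpw'⟩ := hpw
    have hcp : c.1 ≤ p.1 := hc p List.mem_cons_self
    by_cases h : p.1 ≤ c.2 + 1
    · rw [show pvMergeRec (some c) (p :: rest) = pvMergeRec (some (c.1, max c.2 p.2)) rest from by
        simp [pvMergeRec, h]]
      exact ih (c.1, max c.2 p.2) hpw' (fun q hq => hc q (List.mem_cons_of_mem _ hq))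
    · rw [show pvMergeRec (some c) (p :: rest) = c :: pvMergeRec (some p) rest from by
        simp [pvMergeRec, h]]
      obtain ⟨h1, h2⟩ := ih p hpw' hp
      refine ⟨List.pairwise_cons.mpr ⟨fun q hq => le_trans hcp (h2 q hq), h1⟩, ?_⟩
      intro q hq
      rcases List.mem_cons.mp hq with rfl | hq
      · exact le_refl _
      · exact le_trans hcp (h2 q hq)

lemma merge_pairwise (pairs : List (Int × Int)) (h : pairs.Pairwise (fun p q => p.1 ≤ q.1)) :
    (pvMerge pairs).Pairwise (fun p q => p.1 ≤ q.1) := by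
  rw [pvMerge_eq]
  cases pairs with
  | nil => exact List.Pairwise.nil
  | cons p rest =>
    rw [List.pairwise_cons] at h
    exact (mergeRec_pairwise rest p h.2 h.1).1

lemma covered_iff (v : Int) : ∀ (L : List (Int × Int)), L.Pairwise (fun p q => p.1 ≤ q.1) →
    (pvCovered L v = true ↔ pvCovers L v) := by
  intro L
  induction L with
  | nil => intro _; simp [pvCovered, pvCovers]
  | cons p rest ih =>
    intro hpw
    rw [List.pairwise_cons] at hpw
    obtain ⟨hp, hpw'⟩ := hpw
    obtain ⟨lo, hi⟩ := p
    rw [pvCovers_cons]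
    simp only [pvCovered]
    by_cases h1 : v < lo
    · rw [if_pos h1]
      simp only [Bool.false_eq_true, false_iff]
      rintro (⟨ha, _⟩ | ⟨q, hq, hqa, _⟩)
      · omega
      · have := hp q hq; simp at this; omega
    · rw [if_neg h1]
      by_cases h2 : v ≤ hi
      · rw [if_pos h2]
        constructor
        · intro _; left; exact ⟨by omega, h2⟩
        · intro _; rfl
      · rw [if_neg h2]
        rw [ih hpw']
        constructor
        · intro hh; right; exact hh
        · rintro (⟨_, hb⟩ | hh)
          · omega
          · exact hh

lemma checkTI_iff (v : Int) : ∀ (rules : List (List (List Int))),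
    (pvCheckTI rules v = true ↔ ∀ rule ∈ rules,
      ¬(((pvPairAt rule 0).1 ≤ v ∧ v ≤ (pvPairAt rule 0).2) ∨ ((pvPairAt rule 1).1 ≤ v ∧ v ≤ (pvPairAt rule 1).2))) := by
  intro rules
  induction rules with
  | nil => simp [pvCheckTI]
  | cons r rs ih =>
    simp only [pvCheckTI, pvPairAt] at *
    split
    · rename_i h
      simp only [Bool.false_eq_true, false_iff]
      intro hall
      exact hall r List.mem_cons_self h
    · rename_i h
      rw [ih]
      constructor
      · intro hall q hq
        rcases List.mem_cons.mp hq with rfl | hq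
        · exact h
        · exact hall q hq
      · intro hall q hq
        exact hall q (List.mem_cons_of_mem _ hq)

lemma flag_fold (c : Int → Bool) : ∀ (l : List Int) (b : Bool),
    l.foldl (fun b v => if c v then false else b) b = (b && l.all (fun v => !c v)) := by
  intro l
  induction l with
  | nil => intro b; simp
  | cons x xs ih =>
    intro b
    rw [List.foldl_cons, List.all_cons]
    by_cases h : c x = true
    · rw [if_pos h, ih, h]; simp
    · have hf : c x = false := by revert h; cases c x <;> simp
      rw [if_neg h, ih, hf]; simp

lemma rangeMatch_iff (rule : List (List Int)) (v : Int) :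
    pvRangeMatch rule v = true ↔
      (((pvPairAt rule 0).1 ≤ v ∧ v ≤ (pvPairAt rule 0).2) ∨
       ((pvPairAt rule 1).1 ≤ v ∧ v ≤ (pvPairAt rule 1).2)) := by
  simp [pvRangeMatch, pairAt0, pairAt1]

lemma checkTI_iff' (rules : List (List (List Int))) (v : Int) :
    pvCheckTI rules v = true ↔ ∀ rule ∈ rules, pvRangeMatch rule v = false := by
  rw [checkTI_iff v rules]
  constructor
  · intro h rule hr
    cases hm : pvRangeMatch rule v
    · rfl
    · exact absurd ((rangeMatch_iff rule v).mp hm) (h rule hr)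
  · intro h rule hr hm
    have := h rule hr
    rw [← rangeMatch_iff rule v] at hm
    rw [this] at hm
    exact Bool.false_ne_true hm

lemma pvPairs_eq (rules : List (List (List Int))) :
    pvPairs rules = PySem.List.sorted (rules.flatMap pvPairsOf) (fun p => p.1) false := rfl

lemma covers_flat (rules : List (List (List Int))) (v : Int) :
    pvCovers (pvPairs rules) v ↔ ∃ rule ∈ rules, ∃ p ∈ pvPairsOf rule, p.1 ≤ v ∧ v ≤ p.2 := by
  rw [pvPairs_eq]
  unfold pvCovers
  constructor
  · rintro ⟨p, hp, ha⟩
    rw [PySem.List.mem_sorted, List.mem_flatMap] at hp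
    obtain ⟨rule, hr, hm⟩ := hp
    exact ⟨rule, hr, p, hm, ha⟩
  · rintro ⟨rule, hr, p, hm, ha⟩
    refine ⟨p, ?_, ha⟩
    rw [PySem.List.mem_sorted, List.mem_flatMap]
    exact ⟨rule, hr, hm⟩

-- pointwise agreement of the two per-value tests on any value A scans safely
lemma pointwise_eq (rules : List (List (List Int))) (v : Int)
    (h : (∀ rule ∈ rules, pvRuleSafe rule v = true) ∨
      (∃ rule ∈ rules.takeWhile (fun r => pvRuleSafe r v), pvRangeMatch rule v = true)) :
    pvCovered (pvMerge (pvPairs rules)) v = !pvCheckTI rules v := by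
  have hpw : (pvPairs rules).Pairwise (fun p q => p.1 ≤ q.1) :=
    PySem.List.sorted_pairwise _ _
  have h1 := covered_iff v _ (merge_pairwise _ hpw)
  have h2 := merge_covers v _ hpw
  have hcv : pvCovered (pvMerge (pvPairs rules)) v = true ↔
      ∃ rule ∈ rules, ∃ p ∈ pvPairsOf rule, p.1 ≤ v ∧ v ≤ p.2 := by
    rw [h1, h2, covers_flat]
  rcases h with hsafe | ⟨rule, hrt, hm⟩
  · cases hchk : pvCheckTI rules v
    · simp only [Bool.not_false]
      rw [hcv]
      have := (checkTI_iff' rules v)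
      rw [hchk] at this
      simp only [Bool.false_eq_true, false_iff, not_forall] at this
      obtain ⟨rule, hr, hne⟩ := this
      have hm : pvRangeMatch rule v = true := by
        cases hmm : pvRangeMatch rule v
        · exact absurd hmm hne
        · rfl
      exact ⟨rule, hr, match_safe_to_cover rule v (hsafe rule hr) hm⟩
    · simp only [Bool.not_true]
      have hall := (checkTI_iff' rules v).mp hchk
      cases hcov : pvCovered (pvMerge (pvPairs rules)) v
      · rfl
      · obtain ⟨rule, hr, hp⟩ := hcv.mp hcov
        have := guard_cover_to_match rule v hp
        rw [hall rule hr] at this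
        exact absurd this Bool.false_ne_true
  · have hrr : rule ∈ rules := (List.takeWhile_sublist _).subset hrt
    have hsr : pvRuleSafe rule v = true := by simpa using List.mem_takeWhile_imp hrt
    have hcov : pvCovered (pvMerge (pvPairs rules)) v = true :=
      hcv.mpr ⟨rule, hrr, match_safe_to_cover rule v hsr hm⟩
    have hchk : pvCheckTI rules v = false := by
      cases hc : pvCheckTI rules v
      · rfl
      · have := (checkTI_iff' rules v).mp hc rule hrr
        rw [this] at hm
        exact absurd hm Bool.false_ne_true
    rw [hcov, hchk]
    rfl

lemma all_congr_mem {α : Type} (l : List α) (p q : α → Bool) (h : ∀ x ∈ l, p x = q x) :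
    l.all p = l.all q := by
  induction l with
  | nil => rfl
  | cons x xs ih =>
    rw [List.all_cons, List.all_cons, h x List.mem_cons_self,
      ih (fun y hy => h y (List.mem_cons_of_mem _ hy))]

-- ===== VERDICT (by name: the statement is the Claim_ definition above) =====
theorem remove_totally_invalid_spec : Claim_equal_remove_totally_invalid := by
  intro rules tickets _ hpre
  unfold Spec_remove_totally_invalid remove_totally_invalid remove_totally_invalid_alt
  rw [PySem.List.foldl_append_if_eq_filter]
  rw [List.nil_append]
  apply List.filter_congr
  intro t ht
  rw [flag_fold]
  simp only [Bool.true_and]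
  apply all_congr_mem
  intro v hv
  rw [pointwise_eq rules v (hpre t ht v hv)]
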